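-- pv_equiv track=rewrite | github.com/anisa93/TagsCount | test.py | lookup_map_creation
-- ===== SOURCE A (Python) =====
-- def lookup_map_creation(a):
--     lookup_map = {}
--     for l in a:
--         row = l.split(",")
--         t = (row[0], row[1])
--         v = row[2]
--         if t not in lookup_map:
--             lookup_map[t] = v
--     return lookup_map
-- ===== SOURCE B (Python) =====
-- def lookup_map_creation(a):
--     rows = [l.split(",") for l in a]
--     # reverse pass with unconditional assignment: the earliest occurrence is
--     # written last, so it wins; a forward dict comprehension then restores
--     # first-occurrence insertion order.
--     firstval = {}
--     for row in reversed(rows):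
--         firstval[(row[0], row[1])] = row[2]
--     return {(row[0], row[1]): firstval[(row[0], row[1])] for row in rows}
-- ===== Notes on version B (the rewrite author's own statement) =====
-- stated objective: alternative
-- what changed: Replaces the guarded single pass ('if key not in dict') by two guard-free passes: a reverse pass with unconditional assignment (earliest row overwrites last, so its value wins) and a forward dict comprehension that restores first-occurrence key order.
import Mathlib
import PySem

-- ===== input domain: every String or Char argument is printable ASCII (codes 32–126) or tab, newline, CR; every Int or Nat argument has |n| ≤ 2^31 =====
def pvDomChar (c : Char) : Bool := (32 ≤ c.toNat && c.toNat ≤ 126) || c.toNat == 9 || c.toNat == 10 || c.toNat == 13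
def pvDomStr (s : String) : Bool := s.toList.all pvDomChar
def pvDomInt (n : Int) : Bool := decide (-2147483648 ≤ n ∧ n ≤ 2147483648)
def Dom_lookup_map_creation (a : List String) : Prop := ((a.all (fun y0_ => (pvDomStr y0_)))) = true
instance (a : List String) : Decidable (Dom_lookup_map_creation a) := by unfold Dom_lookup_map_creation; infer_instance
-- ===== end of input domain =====

-- B replaces A's guarded single pass ('if key not in dict') by two guard-free passes:
-- a reverse pass with unconditional assignment and a forward comprehension restoring order.

-- ===== PORT A =====
-- row[i] is PySem.List.pyGet? row i; the .getD "" default is only reached where Python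
-- raises IndexError (a row with fewer than 3 fields), which Pre_ excludes.
def lookup_map_creation (a : List String) : List (String × String × String) :=
  ((a.foldl (fun (d : PySem.Dict (String × String) String) l =>
      let row := (PySem.Str.split? l ",").getD []
      let t := ((PySem.List.pyGet? row 0).getD "", (PySem.List.pyGet? row 1).getD "")
      let v := (PySem.List.pyGet? row 2).getD ""
      if d.contains t = false then d.insert t v else d)
    PySem.Dict.empty).items).map (fun p => (p.1.1, p.1.2, p.2))

-- ===== PORT B =====
def lookup_map_creation_alt (a : List String) : List (String × String × String) :=
  let rows := a.map (fun l => (PySem.Str.split? l ",").getD [])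
  let firstval := rows.reverse.foldl
    (fun (d : PySem.Dict (String × String) String) row =>
      d.insert ((PySem.List.pyGet? row 0).getD "", (PySem.List.pyGet? row 1).getD "")
        ((PySem.List.pyGet? row 2).getD "")) PySem.Dict.empty
  ((rows.foldl (fun (d : PySem.Dict (String × String) String) row =>
      d.insert ((PySem.List.pyGet? row 0).getD "", (PySem.List.pyGet? row 1).getD "")
        (firstval.getD ((PySem.List.pyGet? row 0).getD "", (PySem.List.pyGet? row 1).getD "") ""))
    PySem.Dict.empty).items).map (fun p => (p.1.1, p.1.2, p.2))

-- ===== PRECONDITION & SPEC =====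
-- Pre_ excludes exactly the lines with fewer than three comma-separated fields, on which
-- the Python A raises IndexError.
def Pre_lookup_map_creation (a : List String) : Prop :=
  ∀ l ∈ a, 3 ≤ ((PySem.Str.split? l ",").getD []).length
instance (a : List String) : Decidable (Pre_lookup_map_creation a) := by
  unfold Pre_lookup_map_creation; infer_instance
def pvWitness_lookup_map_creation : List String := ["x,y,1", "p,q,2", "x,y,9"]

def Spec_lookup_map_creation (a : List String) (out : List (String × String × String)) : Prop := out = lookup_map_creation_alt a
instance (a : List String) (out : List (String × String × String)) : Decidable (Spec_lookup_map_creation a out) := by unfold Spec_lookup_map_creation; infer_instance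

-- ===== CLAIM (what is proved, stated in full; the proofs are below) =====
def Claim_equal_lookup_map_creation : Prop := ∀ (a : List String), Dom_lookup_map_creation a → Pre_lookup_map_creation a → Spec_lookup_map_creation a (lookup_map_creation a)

-- ===== LEMMAS AND PROOFS =====

-- get? after a plain insert-fold: the LAST occurrence in the list wins.
theorem pv_get_fold_insert {α K V : Type} [DecidableEq K] [BEq K] [LawfulBEq K]
    (key : α → K) (val : α → V) (l : List α) (d : PySem.Dict K V) (k : K) :
    (l.foldl (fun d x => d.insert (key x) (val x)) d).get? k =
      match l.reverse.find? (fun x => key x == k) with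
      | some x => some (val x)
      | none => d.get? k := by
  induction l generalizing d with
  | nil => simp
  | cons p l ih =>
    simp only [List.foldl_cons, List.reverse_cons, List.find?_append]
    rw [ih]
    cases h : l.reverse.find? (fun x => key x == k) with
    | some q => simp
    | none =>
      simp only [Option.none_or]
      by_cases hk : (key p == k) = true
      · have hke : k = key p := (eq_of_beq hk).symm
        subst hke
        simp [List.find?, PySem.Dict.get?_insert_self]
      · have hne : k ≠ key p := fun h' => hk (by simp [h'])
        simp [List.find?, hk, PySem.Dict.get?_insert_of_ne d (val p) hne]

-- overwriting an existing entry with its own stored value changes nothing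
theorem pv_insert_existing {K V : Type} [DecidableEq K] [BEq K] [LawfulBEq K]
    (d : PySem.Dict K V) (k : K) (w : V) (hnd : d.keys.Nodup)
    (h : d.get? k = some w) : d.insert k w = d := by
  apply PySem.Dict.ext
  have hc : d.contains k = true := by
    rw [PySem.Dict.contains_eq_isSome_get?, h]; rfl
  rw [PySem.Dict.items_insert_of_contains d w hc]
  conv_rhs => rw [← List.map_id d.items]
  apply List.map_congr_left
  intro p hp
  by_cases hk : (p.1 == k) = true
  · have hk' : p.1 = k := eq_of_beq hk
    have hget : d.get? p.1 = some p.2 :=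
      PySem.Dict.get?_of_mem_items d hp hnd
    rw [hk', h] at hget
    have hw : w = p.2 := Option.some.inj hget
    simp [← hk', hw]
  · simp [hk]

-- the loop equivalence: A's guarded insert loop equals B's unconditional insert loop
-- feeding values from F, under the invariant that every stored value agrees with F and
-- every absent key has its F-value given by its first occurrence in the remaining suffix.
theorem pv_main {α K V : Type} [DecidableEq K] [BEq K] [LawfulBEq K]
    (key : α → K) (val : α → V) (F : PySem.Dict K V) (dflt : V) :
    ∀ (ss : List α) (d : PySem.Dict K V),
    d.keys.Nodup →
    (∀ k, d.get? k = none →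
        F.get? k = (ss.find? (fun x => key x == k)).map (fun x => val x)) →
    (∀ k w, d.get? k = some w → F.get? k = some w) →
    ss.foldl (fun d x => if d.contains (key x) = false then d.insert (key x) (val x) else d) d
      = ss.foldl (fun d x => d.insert (key x) (F.getD (key x) dflt)) d := by
  intro ss
  induction ss with
  | nil => intro d _ _ _; rfl
  | cons p ss ih =>
    intro d hnd I1 I2
    simp only [List.foldl_cons]
    cases hg : d.get? (key p) with
    | none =>
      have hc : d.contains (key p) = false := by
        rw [PySem.Dict.contains_eq_isSome_get?, hg]; rfl
      have hF : F.get? (key p) = some (val p) := by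
        have := I1 (key p) hg
        simpa [List.find?] using this
      have hgd : F.getD (key p) dflt = val p := by
        rw [PySem.Dict.getD_eq_get?_getD, hF]; rfl
      rw [hc, if_pos rfl, hgd]
      apply ih
      · exact PySem.Dict.nodup_keys_insert _ _ _ hnd
      · intro k hk
        have hne : k ≠ key p := by
          intro h; subst h
          rw [PySem.Dict.get?_insert_self] at hk; cases hk
        rw [PySem.Dict.get?_insert_of_ne d (val p) hne] at hk
        have hb : (key p == k) = false := by
          simp only [beq_eq_false_iff_ne]; exact fun h => hne h.symm
        have := I1 k hk
        rw [List.find?_cons, hb] at this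
        exact this
      · intro k w hk
        by_cases hke : k = key p
        · subst hke
          rw [PySem.Dict.get?_insert_self] at hk
          injection hk with hk; subst hk; exact hF
        · rw [PySem.Dict.get?_insert_of_ne d (val p) hke] at hk
          exact I2 k w hk
    | some w =>
      have hc : d.contains (key p) = true := by
        rw [PySem.Dict.contains_eq_isSome_get?, hg]; rfl
      have hF : F.get? (key p) = some w := I2 (key p) w hg
      have hgd : F.getD (key p) dflt = w := by
        rw [PySem.Dict.getD_eq_get?_getD, hF]; rfl
      rw [hc]
      simp only [Bool.true_eq_false, if_false]
      rw [hgd, pv_insert_existing d (key p) w hnd hg]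
      apply ih d hnd
      · intro k hk
        have hne : k ≠ key p := by
          intro h; subst h; rw [hg] at hk; cases hk
        have hb : (key p == k) = false := by
          simp only [beq_eq_false_iff_ne]; exact fun h => hne h.symm
        have := I1 k hk
        rw [List.find?_cons, hb] at this
        exact this
      · exact I2

-- the two complete folds agree, starting from the empty dict
theorem pv_folds_eq {α K V : Type} [DecidableEq K] [BEq K] [LawfulBEq K]
    (key : α → K) (val : α → V) (dflt : V) (xs : List α) :
    xs.foldl (fun d x => if d.contains (key x) = false then d.insert (key x) (val x) else d)
        PySem.Dict.empty
      = xs.foldl (fun d x => d.insert (key x)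
          ((xs.reverse.foldl (fun d x => d.insert (key x) (val x))
              PySem.Dict.empty).getD (key x) dflt)) PySem.Dict.empty := by
  apply pv_main
  · exact PySem.Dict.nodup_keys_empty
  · intro k _
    rw [pv_get_fold_insert, List.reverse_reverse]
    cases h : xs.find? (fun x => key x == k) with
    | some q => simp
    | none => simp [PySem.Dict.get?_empty]
  · intro k w h
    rw [PySem.Dict.get?_empty] at h
    cases h

-- ===== VERDICT (by name: the statement is the Claim_ definition above) =====
theorem lookup_map_creation_spec : Claim_equal_lookup_map_creation := by
  intro a _ _
  show lookup_map_creation a = lookup_map_creation_alt a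
  have eA : lookup_map_creation a
      = (((a.map (fun l => (PySem.Str.split? l ",").getD [])).foldl
          (fun (d : PySem.Dict (String × String) String) row =>
            if d.contains ((PySem.List.pyGet? row 0).getD "", (PySem.List.pyGet? row 1).getD "") = false
            then d.insert ((PySem.List.pyGet? row 0).getD "", (PySem.List.pyGet? row 1).getD "")
                   ((PySem.List.pyGet? row 2).getD "")
            else d) PySem.Dict.empty).items).map (fun p => (p.1.1, p.1.2, p.2)) := by
    rw [List.foldl_map]
    rfl
  rw [eA,
    pv_folds_eq
      (key := fun row => ((PySem.List.pyGet? row 0).getD "", (PySem.List.pyGet? row 1).getD ""))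
      (val := fun row => (PySem.List.pyGet? row 2).getD "") (dflt := "")
      (xs := a.map (fun l => (PySem.Str.split? l ",").getD []))]
  rfl
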